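-- pv_equiv track=rewrite | github.com/Xpra-org/xpra | src/xpra/codecs/csc_opencl/opencl_kernels.py | get_RGB_formulae
-- ===== SOURCE A (Python) =====
-- YUV_TO_RGB = {"X"    : [255, "*", 1],
--               "A"    : [255, "*", 1],
--               "R"    : ["(", "Y", "*", 1.164, ")", "+", "(", "Cb", "*", 1.5958, ")"],
--               "G"    : ["(", "Y", "*", 1.164, ")", "-", "(", "Cr", "*", 0.39173, ")", "-", "(", "Cb", "*", 0.8129, ")"],
--               "B"    : ["(", "Y", "*", 1.164, ")", "+", "(", "Cr", "*", 2.017, ")"],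
--               }
--
-- def get_RGB_formulae(rgb_channel, bitshift=20):
--     #given an RGB channel (R, G or B), return the formulae for it
--     #which uses the named variables Y, Cb (aka U) and Cr (aka V)
--     f = YUV_TO_RGB[rgb_channel]     #ie: ["Y", "+", 1.5958, "*", "Cb"]
--     mf = []
--     for i in range(len(f)):
--         x = f[i]
--         if x==1:
--             if True:
--                 #special case optimization: "* 1" -> "<<2**bitshift"
--                 assert f[i-1] == "*"
--                 mf = mf[:-1]
--                 mf.append("<<")
--                 x = bitshift
--             else:
--                 x = 2**bitshift
--         elif type(x)==float:
--             x = int(round(x*(2**bitshift)))    #1.5958 -> 1673318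
--         mf.append(x)
--     return " ".join([str(x) for x in mf])
-- ===== SOURCE B (Python) =====
-- # B: rebuilds the formula from a structured per-channel description (signed variable/coefficient
-- # terms, or a shifted constant) instead of rewriting A's flat token stream.
-- YUV_FORMULA = {"X": 255,
--                "A": 255,
--                "R": [("+", "Y", 1.164), ("+", "Cb", 1.5958)],
--                "G": [("+", "Y", 1.164), ("-", "Cr", 0.39173), ("-", "Cb", 0.8129)],
--                "B": [("+", "Y", 1.164), ("+", "Cr", 2.017)],
--                }
--
-- def get_RGB_formulae(rgb_channel, bitshift=20):
--     spec = YUV_FORMULA[rgb_channel]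
--     if isinstance(spec, int):
--         return "%s << %s" % (spec, bitshift)
--     pieces = []
--     for sign, var, coeff in spec:
--         if pieces:
--             pieces.append(sign)
--         pieces.append("( %s * %s )" % (var, int(round(coeff * (2 ** bitshift)))))
--     return " ".join(pieces)
-- ===== Notes on version B (the rewrite author's own statement) =====
-- stated objective: alternative
-- what changed: Replaces A's linear rewrite of the flat token stream (look-back append, tail slicing on the multiply-by-one token, dead constant branch) by a different data structure: a per-channel table of structured sign/variable/coefficient terms or a shifted constant, from which B formats each parenthesised variable-times-coefficient piece directly and joins them with the signs.
import Mathlib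
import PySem

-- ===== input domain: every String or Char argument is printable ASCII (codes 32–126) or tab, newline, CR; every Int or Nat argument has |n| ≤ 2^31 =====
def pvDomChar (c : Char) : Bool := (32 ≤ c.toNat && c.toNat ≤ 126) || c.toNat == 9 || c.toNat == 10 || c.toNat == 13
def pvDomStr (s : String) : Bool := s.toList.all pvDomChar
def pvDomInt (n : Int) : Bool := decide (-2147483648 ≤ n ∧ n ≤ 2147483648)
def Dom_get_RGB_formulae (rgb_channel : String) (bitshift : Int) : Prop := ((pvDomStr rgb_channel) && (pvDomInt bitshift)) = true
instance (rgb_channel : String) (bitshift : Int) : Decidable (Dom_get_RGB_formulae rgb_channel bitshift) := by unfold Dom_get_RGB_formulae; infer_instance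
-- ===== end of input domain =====

-- B rebuilds the formula from a structured per-channel table of (sign, variable, coefficient) terms
-- (or a shifted constant) instead of rewriting A's flat token stream; equal return value proved on Pre_.

-- Table tokens of A: Python int / str / float.  A float literal is kept as its EXACT IEEE-754 value
-- m / 2^k (float.as_integer_ratio), so scaling and round() below are exact on the admitted bitshifts.
inductive Tok where
  | int : Int → Tok
  | str : String → Tok
  | flt : Int → Nat → Tok          -- the float with exact value m / 2^k
deriving DecidableEq, Repr

-- the module constant YUV_TO_RGB (floats replaced by their exact integer ratios)
def yuvTable : PySem.Dict String (List Tok) :=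
  PySem.Dict.ofList [("X", [.int 255, .str "*", .int 1]),
   ("A", [.int 255, .str "*", .int 1]),
   ("R", [.str "(", .str "Y", .str "*", .flt 5242189966259257 52, .str ")", .str "+",
          .str "(", .str "Cb", .str "*", .flt 3593422142678919 51, .str ")"]),
   ("G", [.str "(", .str "Y", .str "*", .flt 5242189966259257 52, .str ")", .str "-",
          .str "(", .str "Cr", .str "*", .flt 3528390164059689 53, .str ")", .str "-",
          .str "(", .str "Cb", .str "*", .flt 915244034272369 50, .str ")"]),
   ("B", [.str "(", .str "Y", .str "*", .flt 5242189966259257 52, .str ")", .str "+",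
          .str "(", .str "Cr", .str "*", .flt 4541880224203145 51, .str ")"])]

-- int(round((m/2^k) * 2**b)): exact round-half-even of m * 2^(b-k).  On Pre_ (bitshift small
-- enough that the Python float product is finite) this is exactly what both Pythons compute;
-- for b - k < -55 the value is < 1/2 (m < 2^54) and rounds to 0, as Python's underflow does.
def roundScaled (m : Int) (k : Nat) (b : Int) : Int :=
  let e : Int := b - (k : Int)
  if 0 ≤ e then m * 2 ^ e.toNat
  else if e < -55 then 0
  else
    let d : Int := 2 ^ (-e).toNat
    let q := PySem.Int.floordiv m d
    let r := m - q * d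
    if 2 * r < d then q else if d < 2 * r then q + 1 else if q % 2 = 0 then q else q + 1

-- str(x) for the values A puts in the output list (floats never reach the join)
def tokStr : Tok → String
  | .int n => PySem.Int.toStr n
  | .str s => s
  | .flt _ _ => ""

-- ===== PORT A =====
-- look-back pass: on x == 1 drop the trailing "*" (mf[:-1]) and emit "<<", bitshift;
-- the assert f[i-1] == "*" always holds on the fixed table, so it is not re-checked here
def get_RGB_formulae (rgb_channel : String) (bitshift : Int) : String :=
  match PySem.Dict.get? yuvTable rgb_channel with
  | none => ""          -- KeyError in Python; excluded by Pre_
  | some (f : List Tok) =>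
    let mf := (List.range f.length).foldl (fun mf i =>
      match f.getD i (.str "") with
      | .int 1 => mf.dropLast ++ [Tok.str "<<", Tok.int bitshift]
      | .flt m k => mf ++ [Tok.int (roundScaled m k bitshift)]
      | x => mf ++ [x]) []
    PySem.Str.join " " (mf.map tokStr)

-- ===== PORT B =====
-- structured per-channel description: a shifted constant, or signed (sign, var, coeff) terms
inductive FSpec where
  | const : Int → FSpec
  | terms : List (String × String × Int × Nat) → FSpec   -- (sign, variable, coeff m, coeff k)
deriving DecidableEq, Repr

def formulaTable : PySem.Dict String FSpec :=
  PySem.Dict.ofList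
   [("X", .const 255),
    ("A", .const 255),
    ("R", .terms [("+", "Y", 5242189966259257, 52), ("+", "Cb", 3593422142678919, 51)]),
    ("G", .terms [("+", "Y", 5242189966259257, 52), ("-", "Cr", 3528390164059689, 53),
                  ("-", "Cb", 915244034272369, 50)]),
    ("B", .terms [("+", "Y", 5242189966259257, 52), ("+", "Cr", 4541880224203145, 51)])]

def get_RGB_formulae_alt (rgb_channel : String) (bitshift : Int) : String :=
  match PySem.Dict.get? formulaTable rgb_channel with
  | none => ""          -- KeyError in Python; excluded by Pre_
  | some (.const n) => PySem.Int.toStr n ++ " << " ++ PySem.Int.toStr bitshift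
  | some (.terms ts) =>
    let pieces := ts.foldl (fun acc t =>
      let piece := "( " ++ t.2.1 ++ " * " ++ PySem.Int.toStr (roundScaled t.2.2.1 t.2.2.2 bitshift) ++ " )"
      if acc.isEmpty then [piece] else acc ++ [t.1, piece]) []
    PySem.Str.join " " pieces

-- ===== PRECONDITION & SPEC =====
-- Exactly the inputs where Python A returns: the channel is a table key, and for the channels with
-- float coefficients bitshift is small enough that no float product overflows (at bitshift 1024 the
-- int->float conversion raises OverflowError, and for the blue channel the float product overflows already at 1023).
def Pre_get_RGB_formulae (rgb_channel : String) (bitshift : Int) : Prop :=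
  rgb_channel = "X" ∨ rgb_channel = "A" ∨
  ((rgb_channel = "R" ∨ rgb_channel = "G") ∧ bitshift ≤ 1023) ∨
  (rgb_channel = "B" ∧ bitshift ≤ 1022)
instance (rgb_channel : String) (bitshift : Int) : Decidable (Pre_get_RGB_formulae rgb_channel bitshift) := by unfold Pre_get_RGB_formulae; infer_instance

def pvWitness_get_RGB_formulae : String × Int := ("R", 20)

def Spec_get_RGB_formulae (rgb_channel : String) (bitshift : Int) (out : String) : Prop := out = get_RGB_formulae_alt rgb_channel bitshift
instance (rgb_channel : String) (bitshift : Int) (out : String) : Decidable (Spec_get_RGB_formulae rgb_channel bitshift out) := by unfold Spec_get_RGB_formulae; infer_instance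

-- ===== CLAIM =====
def Claim_equal_get_RGB_formulae : Prop := ∀ (rgb_channel : String) (bitshift : Int), Dom_get_RGB_formulae rgb_channel bitshift → Pre_get_RGB_formulae rgb_channel bitshift → Spec_get_RGB_formulae rgb_channel bitshift (get_RGB_formulae rgb_channel bitshift)

-- ===== LEMMAS AND PROOFS =====

-- Dict lookups on the two literal tables, per key
theorem getA_X : PySem.Dict.get? yuvTable "X" = some [.int 255, .str "*", .int 1] := by rfl
theorem getA_A : PySem.Dict.get? yuvTable "A" = some [.int 255, .str "*", .int 1] := by rfl
theorem getA_R : PySem.Dict.get? yuvTable "R" = some [.str "(", .str "Y", .str "*", .flt 5242189966259257 52, .str ")", .str "+", .str "(", .str "Cb", .str "*", .flt 3593422142678919 51, .str ")"] := by rfl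
theorem getA_G : PySem.Dict.get? yuvTable "G" = some [.str "(", .str "Y", .str "*", .flt 5242189966259257 52, .str ")", .str "-", .str "(", .str "Cr", .str "*", .flt 3528390164059689 53, .str ")", .str "-", .str "(", .str "Cb", .str "*", .flt 915244034272369 50, .str ")"] := by rfl
theorem getA_B : PySem.Dict.get? yuvTable "B" = some [.str "(", .str "Y", .str "*", .flt 5242189966259257 52, .str ")", .str "+", .str "(", .str "Cr", .str "*", .flt 4541880224203145 51, .str ")"] := by rfl
theorem getB_X : PySem.Dict.get? formulaTable "X" = some (.const 255) := by rfl
theorem getB_A : PySem.Dict.get? formulaTable "A" = some (.const 255) := by rfl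
theorem getB_R : PySem.Dict.get? formulaTable "R" = some (.terms [("+", "Y", 5242189966259257, 52), ("+", "Cb", 3593422142678919, 51)]) := by rfl
theorem getB_G : PySem.Dict.get? formulaTable "G" = some (.terms [("+", "Y", 5242189966259257, 52), ("-", "Cr", 3528390164059689, 53), ("-", "Cb", 915244034272369, 50)]) := by rfl
theorem getB_B : PySem.Dict.get? formulaTable "B" = some (.terms [("+", "Y", 5242189966259257, 52), ("+", "Cr", 4541880224203145, 51)]) := by rfl

set_option maxRecDepth 8000 in
theorem eq_X (b : Int) : get_RGB_formulae "X" b = get_RGB_formulae_alt "X" b := by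
  simp only [get_RGB_formulae, get_RGB_formulae_alt, getA_X, getB_X]
  rw [← String.toList_inj]
  simp [List.range_succ, tokStr, PySem.Str.toList_join, PySem.Chars.join, List.intercalate, List.intersperse]

set_option maxRecDepth 8000 in
theorem eq_A (b : Int) : get_RGB_formulae "A" b = get_RGB_formulae_alt "A" b := by
  simp only [get_RGB_formulae, get_RGB_formulae_alt, getA_A, getB_A]
  rw [← String.toList_inj]
  simp [List.range_succ, tokStr, PySem.Str.toList_join, PySem.Chars.join, List.intercalate, List.intersperse]

theorem eq_R (b : Int) : get_RGB_formulae "R" b = get_RGB_formulae_alt "R" b := by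
  simp only [get_RGB_formulae, get_RGB_formulae_alt, getA_R, getB_R]
  rw [← String.toList_inj]
  simp [List.range_succ, tokStr, PySem.Str.toList_join, PySem.Chars.join, List.intercalate, List.intersperse]

theorem eq_G (b : Int) : get_RGB_formulae "G" b = get_RGB_formulae_alt "G" b := by
  simp only [get_RGB_formulae, get_RGB_formulae_alt, getA_G, getB_G]
  rw [← String.toList_inj]
  simp [List.range_succ, tokStr, PySem.Str.toList_join, PySem.Chars.join, List.intercalate, List.intersperse]

theorem eq_B (b : Int) : get_RGB_formulae "B" b = get_RGB_formulae_alt "B" b := by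
  simp only [get_RGB_formulae, get_RGB_formulae_alt, getA_B, getB_B]
  rw [← String.toList_inj]
  simp [List.range_succ, tokStr, PySem.Str.toList_join, PySem.Chars.join, List.intercalate, List.intersperse]

-- ===== VERDICT =====
theorem get_RGB_formulae_spec : Claim_equal_get_RGB_formulae := by
  intro c b _ hpre
  unfold Spec_get_RGB_formulae
  unfold Pre_get_RGB_formulae at hpre
  rcases hpre with h | h | ⟨h | h, -⟩ | ⟨h, -⟩ <;> subst h
  · exact eq_X b
  · exact eq_A b
  · exact eq_R b
  · exact eq_G b
  · exact eq_B b
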